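-- pv_equiv track=rewrite | github.com/gamersover/Chinese_company_algorithm_test | 互联网公司笔试题/今日头条_最大区间.py | maxRegion
-- ===== SOURCE A (Python) =====
-- def maxRegion(arr):
--     max_value = 0
--     for i in range(len(arr)):
--         sum_a = arr[i]
--         k = 1
--         while i+k < len(arr):
--             if arr[i+k] >= arr[i]:
--                 sum_a += arr[i+k]
--                 k+=1
--             else:
--                 break
--
--         k = 1
--         while i-k >=0:
--             if arr[i-k] >= arr[i]:
--                 sum_a += arr[i-k]
--                 k+=1
--             else:
--                 break
--
--         max_value = max(sum_a*arr[i], max_value)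
--     return max_value
-- ===== SOURCE B (Python) =====
-- def maxRegion(arr):
--     n = len(arr)
--     pre = [0]
--     for x in arr:
--         pre.append(pre[-1] + x)
--     # start[i] = leftmost index of the maximal region around i (elements >= arr[i]),
--     # found with a monotonic stack of indices with strictly increasing values.
--     start = []
--     stack = []
--     for i in range(n):
--         while stack and arr[stack[-1]] >= arr[i]:
--             stack.pop()
--         start.append(stack[-1] + 1 if stack else 0)
--         stack.append(i)
--     # end[i] = one past the rightmost index of that region.
--     end = []
--     stack = []
--     for i in range(n - 1, -1, -1):
--         while stack and arr[stack[-1]] >= arr[i]: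
--             stack.pop()
--         end.append(stack[-1] if stack else n)
--         stack.append(i)
--     end.reverse()
--     best = 0
--     for i in range(n):
--         best = max((pre[end[i]] - pre[start[i]]) * arr[i], best)
--     return best
-- ===== Notes on version B (the rewrite author's own statement) =====
-- stated objective: faster
-- what changed: A expands the region around each index with two inner while-loops (O(n^2)); B computes each region's boundaries once with two monotonic-stack passes (nearest smaller element on each side) and reads region sums from a prefix-sum array, in O(n).
import Mathlib
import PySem

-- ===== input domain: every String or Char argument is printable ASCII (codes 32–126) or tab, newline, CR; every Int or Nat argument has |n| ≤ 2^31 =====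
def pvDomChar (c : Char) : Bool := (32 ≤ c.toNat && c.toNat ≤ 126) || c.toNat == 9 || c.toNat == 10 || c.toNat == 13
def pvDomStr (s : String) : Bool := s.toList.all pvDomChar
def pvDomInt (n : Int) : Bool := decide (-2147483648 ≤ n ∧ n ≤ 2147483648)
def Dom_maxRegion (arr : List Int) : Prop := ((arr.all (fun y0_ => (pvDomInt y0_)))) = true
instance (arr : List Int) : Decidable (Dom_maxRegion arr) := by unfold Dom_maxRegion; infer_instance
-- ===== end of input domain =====

-- B replaces A's per-index two-sided O(n^2) expansion by monotonic stacks computing the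
-- region boundaries plus prefix sums, an O(n) algorithm returning the same value.

-- ===== PORT A =====
-- inner while-loop extending the region to the right (k increases while arr[i+k] >= arr[i])
def goR (arr : List Int) (p : Int) (i k : Nat) (s : Int) : Int :=
  if i + k < arr.length then
    if p ≤ arr.getD (i + k) 0 then goR arr p i (k + 1) (s + arr.getD (i + k) 0) else s
  else s
termination_by arr.length - (i + k)
decreasing_by omega

-- inner while-loop extending the region to the left (while i-k >= 0 and arr[i-k] >= arr[i])
def goL (arr : List Int) (p : Int) (i k : Nat) (s : Int) : Int :=
  if k ≤ i then
    if p ≤ arr.getD (i - k) 0 then goL arr p i (k + 1) (s + arr.getD (i - k) 0) else s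
  else s
termination_by i + 1 - k
decreasing_by omega

def maxRegion (arr : List Int) : Int :=
  (List.range arr.length).foldl (fun mx i =>
    max (goL arr (arr.getD i 0) i 1 (goR arr (arr.getD i 0) i 1 (arr.getD i 0)) * arr.getD i 0) mx) 0

-- ===== PORT B =====
-- pre = [0]; for x in arr: pre.append(pre[-1] + x)   (running prefix sums)
def preList (s : Int) : List Int → List Int
  | [] => [s]
  | x :: xs => s :: preList (s + x) xs

-- one iteration of the first stack loop; the pop-while loop is dropWhile on the head-top stack
def stepF (arr : List Int) (st : List Nat × List Nat) (i : Nat) : List Nat × List Nat :=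
  let stk := st.1.dropWhile (fun j => arr.getD i 0 ≤ arr.getD j 0)
  (i :: stk, st.2 ++ [match stk with | [] => 0 | j :: _ => j + 1])

-- one iteration of the second stack loop (runs over indices n-1 .. 0)
def stepB (arr : List Int) (st : List Nat × List Nat) (i : Nat) : List Nat × List Nat :=
  let stk := st.1.dropWhile (fun j => arr.getD i 0 ≤ arr.getD j 0)
  (i :: stk, st.2 ++ [match stk with | [] => arr.length | j :: _ => j])

def maxRegion_alt (arr : List Int) : Int :=
  let n := arr.length
  let pre := preList 0 arr
  let starts := ((List.range n).foldl (stepF arr) ([], [])).2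
  let ends := ((((List.range n).reverse).foldl (stepB arr) ([], [])).2).reverse
  (List.range n).foldl (fun best i =>
    max ((pre.getD (ends.getD i 0) 0 - pre.getD (starts.getD i 0) 0) * arr.getD i 0) best) 0

-- ===== PRECONDITION & SPEC =====
def Spec_maxRegion (arr : List Int) (out : Int) : Prop := out = maxRegion_alt arr
instance (arr : List Int) (out : Int) : Decidable (Spec_maxRegion arr out) := by unfold Spec_maxRegion; infer_instance

-- ===== CLAIM (what is proved, stated in full; the proofs are below) =====
def Claim_equal_maxRegion : Prop := ∀ (arr : List Int), Dom_maxRegion arr → Spec_maxRegion arr (maxRegion arr)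

-- ===== LEMMAS AND PROOFS =====

-- length of the run of elements ≥ arr[i] going left from i-1 / right from i+1
def lextLen (arr : List Int) (i : Nat) : Nat :=
  (((arr.take i).reverse).takeWhile (fun x => arr.getD i 0 ≤ x)).length
def rextLen (arr : List Int) (i : Nat) : Nat :=
  ((arr.drop (i + 1)).takeWhile (fun x => arr.getD i 0 ≤ x)).length
def startSpec (arr : List Int) (i : Nat) : Nat := i - lextLen arr i
def endSpec (arr : List Int) (i : Nat) : Nat := i + 1 + rextLen arr i

-- characterisation of the left boundary: QL arr i j ↔ j is THE start of the maximal run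
def QL (arr : List Int) (i : Nat) (j : Nat) : Prop :=
  j ≤ i ∧ (∀ k, j ≤ k → k < i → arr.getD i 0 ≤ arr.getD k 0) ∧
    (j = 0 ∨ arr.getD (j - 1) 0 < arr.getD i 0)
def QR (arr : List Int) (i : Nat) (e : Nat) : Prop :=
  i < e ∧ e ≤ arr.length ∧ (∀ k, i < k → k < e → arr.getD i 0 ≤ arr.getD k 0) ∧
    (e = arr.length ∨ arr.getD e 0 < arr.getD i 0)

lemma dropWhile_head_false {α : Type} (p : α → Bool) (l : List α) (j : α) (t : List α)
    (h : l.dropWhile p = j :: t) : p j = false := by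
  induction l with
  | nil => simp [List.dropWhile] at h
  | cons a l ih =>
    rw [List.dropWhile_cons] at h
    split at h
    · exact ih h
    · next hpa =>
      obtain ⟨rfl, rfl⟩ : a = j ∧ l = t := by exact ⟨(List.cons.injEq ..).mp h |>.1, (List.cons.injEq ..).mp h |>.2⟩
      simpa using hpa

-- the element just after the takeWhile prefix fails the predicate
lemma takeWhile_next_false (p : Int → Bool) (l : List Int)
    (h : (l.takeWhile p).length < l.length) :
    p (l.getD (l.takeWhile p).length 0) = false := by
  induction l with
  | nil => simp at h
  | cons a l ih =>
    by_cases hpa : p a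
    · rw [List.takeWhile_cons_of_pos hpa] at h ⊢
      simpa using ih (by simpa using h)
    · rw [List.takeWhile_cons_of_neg hpa]
      simpa using hpa

lemma QL_lt_absurd (arr : List Int) (i j1 j2 : Nat) (h1 : QL arr i j1) (h2 : QL arr i j2)
    (hlt : j1 < j2) : False := by
  obtain ⟨h1a, h1b, h1c⟩ := h1
  obtain ⟨h2a, h2b, h2c⟩ := h2
  rcases h2c with rfl | hv
  · omega
  · have := h1b (j2 - 1) (by omega) (by omega)
    omega

lemma QL_unique (arr : List Int) (i j1 j2 : Nat) (h1 : QL arr i j1) (h2 : QL arr i j2) :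
    j1 = j2 := by
  rcases Nat.lt_trichotomy j1 j2 with h | h | h
  · exact absurd (QL_lt_absurd arr i j1 j2 h1 h2 h) (by simp)
  · exact h
  · exact absurd (QL_lt_absurd arr i j2 j1 h2 h1 h) (by simp)

lemma QR_lt_absurd (arr : List Int) (i e1 e2 : Nat) (h1 : QR arr i e1) (h2 : QR arr i e2)
    (hlt : e1 < e2) : False := by
  obtain ⟨h1a, h1b, h1c, h1d⟩ := h1
  obtain ⟨h2a, h2b, h2c, h2d⟩ := h2
  rcases h1d with rfl | hv
  · omega
  · have := h2c e1 (by omega) (by omega)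
    omega

lemma QR_unique (arr : List Int) (i e1 e2 : Nat) (h1 : QR arr i e1) (h2 : QR arr i e2) :
    e1 = e2 := by
  rcases Nat.lt_trichotomy e1 e2 with h | h | h
  · exact absurd (QR_lt_absurd arr i e1 e2 h1 h2 h) (by simp)
  · exact h
  · exact absurd (QR_lt_absurd arr i e2 e1 h2 h1 h) (by simp)

lemma QL_startSpec (arr : List Int) (i : Nat) (hi : i < arr.length) :
    QL arr i (startSpec arr i) := by
  have hLdef : lextLen arr i =
      (((arr.take i).reverse).takeWhile (fun x => decide (arr.getD i 0 ≤ x))).length := rfl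
  have hrlen : ((arr.take i).reverse).length = i := by
    simp [List.length_take, Nat.min_eq_left (le_of_lt hi)]
  have hL : lextLen arr i ≤ i := by
    rw [hLdef]
    calc (((arr.take i).reverse).takeWhile (fun x => decide (arr.getD i 0 ≤ x))).length
        ≤ ((arr.take i).reverse).length := (List.takeWhile_prefix _).length_le
      _ = i := hrlen
  have hrget : ∀ q, q < i → ((arr.take i).reverse).getD q 0 = arr.getD (i - 1 - q) 0 := by
    intro q hq
    have hq' : q < ((arr.take i).reverse).length := by omega
    have h2 : i - 1 - q < arr.length := by omega
    rw [List.getD_eq_getElem _ 0 hq', List.getD_eq_getElem arr 0 h2, List.getElem_reverse]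
    simp only [List.getElem_take]
    congr 1
    rw [List.length_take, Nat.min_eq_left (le_of_lt hi)]
  have htw : ∀ q, q < lextLen arr i → arr.getD i 0 ≤ ((arr.take i).reverse).getD q 0 := by
    intro q hq
    have h1 : List.takeWhile (fun x => decide (arr.getD i 0 ≤ x)) ((arr.take i).reverse)
        = ((arr.take i).reverse).take (lextLen arr i) := by
      rw [hLdef]
      exact List.prefix_iff_eq_take.mp (List.takeWhile_prefix _)
    have hq2 : q < ((arr.take i).reverse).length := by omega
    have hq3 : q < (((arr.take i).reverse).take (lextLen arr i)).length := by
      simp only [List.length_take]; omega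
    have hmem : (((arr.take i).reverse).take (lextLen arr i))[q]
        ∈ List.takeWhile (fun x => decide (arr.getD i 0 ≤ x)) ((arr.take i).reverse) := by
      rw [h1]; exact List.getElem_mem hq3
    have h4 := List.mem_takeWhile_imp hmem
    simp only [List.getElem_take, decide_eq_true_eq] at h4
    rwa [List.getD_eq_getElem _ 0 hq2]
  refine ⟨by unfold startSpec; omega, ?_, ?_⟩
  · intro k hk1 hk2
    unfold startSpec at hk1
    have hq : i - 1 - k < lextLen arr i := by omega
    have h5 := htw (i - 1 - k) hq
    rw [hrget (i - 1 - k) (by omega)] at h5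
    have hke : i - 1 - (i - 1 - k) = k := by omega
    rwa [hke] at h5
  · by_cases h0 : startSpec arr i = 0
    · exact Or.inl h0
    · right
      have hLlt : lextLen arr i < i := by unfold startSpec at h0; omega
      have hlen : ((((arr.take i).reverse)).takeWhile
          (fun x => decide (arr.getD i 0 ≤ x))).length < ((arr.take i).reverse).length := by
        rw [← hLdef, hrlen]; exact hLlt
      have hnext := takeWhile_next_false (fun x => decide (arr.getD i 0 ≤ x))
        ((arr.take i).reverse) hlen
      rw [← hLdef, hrget (lextLen arr i) hLlt] at hnext
      have h6 : ¬ (arr.getD i 0 ≤ arr.getD (i - 1 - lextLen arr i) 0) := by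
        simpa using hnext
      have he : startSpec arr i - 1 = i - 1 - lextLen arr i := by unfold startSpec; omega
      rw [he]; omega

lemma QR_endSpec (arr : List Int) (i : Nat) (hi : i < arr.length) :
    QR arr i (endSpec arr i) := by
  have hRdef : rextLen arr i =
      ((arr.drop (i + 1)).takeWhile (fun x => decide (arr.getD i 0 ≤ x))).length := rfl
  have hdlen : (arr.drop (i + 1)).length = arr.length - (i + 1) := by simp
  have hR : rextLen arr i ≤ arr.length - (i + 1) := by
    rw [hRdef]
    calc ((arr.drop (i + 1)).takeWhile (fun x => decide (arr.getD i 0 ≤ x))).length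
        ≤ (arr.drop (i + 1)).length := (List.takeWhile_prefix _).length_le
      _ = arr.length - (i + 1) := hdlen
  have hdget : ∀ q, q < arr.length - (i + 1) →
      (arr.drop (i + 1)).getD q 0 = arr.getD (i + 1 + q) 0 := by
    intro q hq
    have hq' : q < (arr.drop (i + 1)).length := by omega
    have h2 : i + 1 + q < arr.length := by omega
    rw [List.getD_eq_getElem _ 0 hq', List.getD_eq_getElem arr 0 h2, List.getElem_drop]
  have htw : ∀ q, q < rextLen arr i → arr.getD i 0 ≤ (arr.drop (i + 1)).getD q 0 := by
    intro q hq
    have h1 : List.takeWhile (fun x => decide (arr.getD i 0 ≤ x)) (arr.drop (i + 1))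
        = (arr.drop (i + 1)).take (rextLen arr i) := by
      rw [hRdef]
      exact List.prefix_iff_eq_take.mp (List.takeWhile_prefix _)
    have hq2 : q < (arr.drop (i + 1)).length := by omega
    have hq3 : q < ((arr.drop (i + 1)).take (rextLen arr i)).length := by
      simp only [List.length_take]; omega
    have hmem : ((arr.drop (i + 1)).take (rextLen arr i))[q]
        ∈ List.takeWhile (fun x => decide (arr.getD i 0 ≤ x)) (arr.drop (i + 1)) := by
      rw [h1]; exact List.getElem_mem hq3
    have h4 := List.mem_takeWhile_imp hmem
    simp only [List.getElem_take, decide_eq_true_eq] at h4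
    rwa [List.getD_eq_getElem _ 0 hq2]
  refine ⟨by unfold endSpec; omega, by unfold endSpec; omega, ?_, ?_⟩
  · intro k hk1 hk2
    unfold endSpec at hk2
    have hq : k - (i + 1) < rextLen arr i := by omega
    have h5 := htw (k - (i + 1)) hq
    rw [hdget (k - (i + 1)) (by omega)] at h5
    have hke : i + 1 + (k - (i + 1)) = k := by omega
    rwa [hke] at h5
  · by_cases h0 : endSpec arr i = arr.length
    · exact Or.inl h0
    · right
      have hRlt : rextLen arr i < arr.length - (i + 1) := by unfold endSpec at h0; omega
      have hlen : ((arr.drop (i + 1)).takeWhile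
          (fun x => decide (arr.getD i 0 ≤ x))).length < (arr.drop (i + 1)).length := by
        rw [← hRdef, hdlen]; exact hRlt
      have hnext := takeWhile_next_false (fun x => decide (arr.getD i 0 ≤ x))
        (arr.drop (i + 1)) hlen
      rw [← hRdef, hdget (rextLen arr i) hRlt] at hnext
      have h6 : ¬ (arr.getD i 0 ≤ arr.getD (i + 1 + rextLen arr i) 0) := by simpa using hnext
      unfold endSpec
      omega

-- monotonic-stack invariant for the forward pass (indices < m processed)
def SInvF (arr : List Int) (m : Nat) (stk : List Nat) : Prop :=
  (∀ j ∈ stk, j < m ∧ ∀ k, j < k → k < m → arr.getD j 0 < arr.getD k 0) ∧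
  (∀ j, j < m → (∀ k, j < k → k < m → arr.getD j 0 < arr.getD k 0) → j ∈ stk) ∧
  stk.Pairwise (· > ·)

-- invariant for the backward pass (indices ≥ m processed)
def SInvB (arr : List Int) (m : Nat) (stk : List Nat) : Prop :=
  (∀ j ∈ stk, m ≤ j ∧ j < arr.length ∧ ∀ k, m ≤ k → k < j → arr.getD j 0 < arr.getD k 0) ∧
  (∀ j, m ≤ j → j < arr.length → (∀ k, m ≤ k → k < j → arr.getD j 0 < arr.getD k 0) → j ∈ stk) ∧
  stk.Pairwise (· < ·)

lemma SInvF_step (arr : List Int) (i : Nat) (stk : List Nat) (hi : i < arr.length)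
    (h : SInvF arr i stk) :
    SInvF arr (i + 1) (i :: stk.dropWhile (fun j => arr.getD i 0 ≤ arr.getD j 0)) ∧
    (match stk.dropWhile (fun j => arr.getD i 0 ≤ arr.getD j 0) with
      | [] => 0 | j :: _ => j + 1) = startSpec arr i := by
  obtain ⟨hS, hC, hP⟩ := h
  set p : Nat → Bool := fun j => decide (arr.getD i 0 ≤ arr.getD j 0) with hp
  have hmem' : ∀ j ∈ stk.dropWhile p, j ∈ stk := fun j hj => (List.dropWhile_sublist p).subset hj
  have hP' : (stk.dropWhile p).Pairwise (· > ·) :=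
    List.Pairwise.sublist (List.dropWhile_sublist p) hP
  have hlt : ∀ j ∈ stk.dropWhile p, arr.getD j 0 < arr.getD i 0 := by
    intro j hj
    rcases hdw : stk.dropWhile p with _ | ⟨j0, t⟩
    · rw [hdw] at hj; simp at hj
    · rw [hdw] at hj hP'
      have hj0 : arr.getD j0 0 < arr.getD i 0 := by
        have hf := dropWhile_head_false p stk j0 t hdw
        simp only [hp, decide_eq_false_iff_not, not_le] at hf
        exact hf
      rcases List.mem_cons.mp hj with rfl | hjt
      · exact hj0
      · have hgt : j0 > j := (List.pairwise_cons.mp hP').1 j hjt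
        have hj0i : j0 < i :=
          (hS j0 (hmem' j0 (by rw [hdw]; exact List.mem_cons_self ..))).1
        have hjs := hS j (hmem' j (by rw [hdw]; exact List.mem_cons_of_mem _ hjt))
        have := hjs.2 j0 hgt hj0i
        omega
  have hnotin_tw : ∀ j, arr.getD j 0 < arr.getD i 0 → j ∈ stk → j ∈ stk.dropWhile p := by
    intro j hjv hjs
    rw [← List.takeWhile_append_dropWhile (p := p) (l := stk)] at hjs
    rcases List.mem_append.mp hjs with htw | hdw
    · have := List.mem_takeWhile_imp htw
      simp only [hp, decide_eq_true_eq] at this; omega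
    · exact hdw
  have hInv : SInvF arr (i + 1) (i :: stk.dropWhile p) := by
    refine ⟨?_, ?_, ?_⟩
    · intro j hj
      rcases List.mem_cons.mp hj with rfl | hjd
      · exact ⟨by omega, fun k hk1 hk2 => by omega⟩
      · have hji : j < i := (hS j (hmem' j hjd)).1
        refine ⟨by omega, fun k hk1 hk2 => ?_⟩
        by_cases hki : k = i
        · subst hki; exact hlt j hjd
        · exact (hS j (hmem' j hjd)).2 k hk1 (by omega)
    · intro j hj hcond
      by_cases hji : j = i
      · subst hji; exact List.mem_cons_self ..
      · have hji' : j < i := by omega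
        have hjs : j ∈ stk := hC j hji' (fun k hk1 hk2 => hcond k hk1 (by omega))
        have hjv : arr.getD j 0 < arr.getD i 0 := hcond i hji' (by omega)
        exact List.mem_cons_of_mem _ (hnotin_tw j hjv hjs)
    · exact List.pairwise_cons.mpr ⟨fun j hj => (hS j (hmem' j hj)).1, hP'⟩
  refine ⟨hInv, ?_⟩
  have hQ : QL arr i (match stk.dropWhile p with | [] => 0 | j :: _ => j + 1) := by
    rcases hdw : stk.dropWhile p with _ | ⟨j0, t⟩
    · show QL arr i 0
      refine ⟨Nat.zero_le i, ?_, Or.inl rfl⟩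
      intro k hk1 hk2
      by_contra hkv
      push Not at hkv
      have hPk : (fun n => n < i ∧ arr.getD n 0 < arr.getD i 0) k := ⟨hk2, hkv⟩
      obtain ⟨hK1, hK2⟩ := Nat.findGreatest_spec
        (P := fun n => n < i ∧ arr.getD n 0 < arr.getD i 0) (le_of_lt hk2) hPk
      have hKmax : ∀ k', Nat.findGreatest (fun n => n < i ∧ arr.getD n 0 < arr.getD i 0) i < k' →
          k' < i → arr.getD i 0 ≤ arr.getD k' 0 := by
        intro k' h1 h2
        have := Nat.findGreatest_is_greatest h1 (le_of_lt h2)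
        by_contra hc; push Not at hc
        exact this ⟨h2, hc⟩
      have hKmem : Nat.findGreatest (fun n => n < i ∧ arr.getD n 0 < arr.getD i 0) i ∈ stk := by
        refine hC _ hK1 (fun k' h1 h2 => ?_)
        have hx := hKmax k' h1 h2
        omega
      have := hnotin_tw _ hK2 hKmem
      rw [hdw] at this
      simp at this
    · show QL arr i (j0 + 1)
      have hj0s : j0 ∈ stk := hmem' j0 (by rw [hdw]; exact List.mem_cons_self ..)
      have hj0i : j0 < i := (hS j0 hj0s).1
      refine ⟨by omega, ?_, ?_⟩
      · intro k hk1 hk2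
        by_contra hkv
        push Not at hkv
        have hPk : (fun n => j0 + 1 ≤ n ∧ n < i ∧ arr.getD n 0 < arr.getD i 0) k :=
          ⟨hk1, hk2, hkv⟩
        obtain ⟨hK1, hK2, hK3⟩ := Nat.findGreatest_spec
          (P := fun n => j0 + 1 ≤ n ∧ n < i ∧ arr.getD n 0 < arr.getD i 0) (le_of_lt hk2) hPk
        have hKmax : ∀ k',
            Nat.findGreatest (fun n => j0 + 1 ≤ n ∧ n < i ∧ arr.getD n 0 < arr.getD i 0) i < k' →
            k' < i → arr.getD i 0 ≤ arr.getD k' 0 := by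
          intro k' h1 h2
          have hge := Nat.findGreatest_is_greatest h1 (le_of_lt h2)
          by_contra hc; push Not at hc
          have hj1 : j0 + 1 ≤ k' := by omega
          exact hge ⟨hj1, h2, hc⟩
        have hKmem :
            Nat.findGreatest (fun n => j0 + 1 ≤ n ∧ n < i ∧ arr.getD n 0 < arr.getD i 0) i
              ∈ stk := by
          refine hC _ hK2 (fun k' h1 h2 => ?_)
          have hx := hKmax k' h1 h2
          omega
        have hKd := hnotin_tw _ hK3 hKmem
        rw [hdw] at hKd
        rcases List.mem_cons.mp hKd with heq | hKt
        · omega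
        · rw [hdw] at hP'
          have := (List.pairwise_cons.mp hP').1 _ hKt
          omega
      · right
        have := hlt j0 (by rw [hdw]; exact List.mem_cons_self ..)
        simpa using this
  exact QL_unique arr i _ _ hQ (QL_startSpec arr i hi)

lemma SInvB_step (arr : List Int) (i : Nat) (stk : List Nat) (hi : i < arr.length)
    (h : SInvB arr (i + 1) stk) :
    SInvB arr i (i :: stk.dropWhile (fun j => arr.getD i 0 ≤ arr.getD j 0)) ∧
    (match stk.dropWhile (fun j => arr.getD i 0 ≤ arr.getD j 0) with
      | [] => arr.length | j :: _ => j) = endSpec arr i := by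
  obtain ⟨hS, hC, hP⟩ := h
  set p : Nat → Bool := fun j => decide (arr.getD i 0 ≤ arr.getD j 0) with hp
  have hmem' : ∀ j ∈ stk.dropWhile p, j ∈ stk := fun j hj => (List.dropWhile_sublist p).subset hj
  have hP' : (stk.dropWhile p).Pairwise (· < ·) :=
    List.Pairwise.sublist (List.dropWhile_sublist p) hP
  have hlt : ∀ j ∈ stk.dropWhile p, arr.getD j 0 < arr.getD i 0 := by
    intro j hj
    rcases hdw : stk.dropWhile p with _ | ⟨j0, t⟩
    · rw [hdw] at hj; simp at hj
    · rw [hdw] at hj hP'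
      have hj0 : arr.getD j0 0 < arr.getD i 0 := by
        have hf := dropWhile_head_false p stk j0 t hdw
        simp only [hp, decide_eq_false_iff_not, not_le] at hf
        exact hf
      rcases List.mem_cons.mp hj with rfl | hjt
      · exact hj0
      · have hgt : j0 < j := (List.pairwise_cons.mp hP').1 j hjt
        have hj0g := hS j0 (hmem' j0 (by rw [hdw]; exact List.mem_cons_self ..))
        have hjs := hS j (hmem' j (by rw [hdw]; exact List.mem_cons_of_mem _ hjt))
        have := hjs.2.2 j0 hj0g.1 hgt
        omega
  have hnotin_tw : ∀ j, arr.getD j 0 < arr.getD i 0 → j ∈ stk → j ∈ stk.dropWhile p := by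
    intro j hjv hjs
    rw [← List.takeWhile_append_dropWhile (p := p) (l := stk)] at hjs
    rcases List.mem_append.mp hjs with htw | hdw
    · have := List.mem_takeWhile_imp htw
      simp only [hp, decide_eq_true_eq] at this; omega
    · exact hdw
  have hInv : SInvB arr i (i :: stk.dropWhile p) := by
    refine ⟨?_, ?_, ?_⟩
    · intro j hj
      rcases List.mem_cons.mp hj with rfl | hjd
      · exact ⟨le_refl _, hi, fun k hk1 hk2 => by omega⟩
      · have hjs := hS j (hmem' j hjd)
        refine ⟨by omega, hjs.2.1, fun k hk1 hk2 => ?_⟩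
        by_cases hki : k = i
        · subst hki; exact hlt j hjd
        · exact hjs.2.2 k (by omega) hk2
    · intro j hj1 hj2 hcond
      by_cases hji : j = i
      · subst hji; exact List.mem_cons_self ..
      · have hji' : i < j := by omega
        have hjs : j ∈ stk := hC j (by omega) hj2 (fun k hk1 hk2 => hcond k (by omega) hk2)
        have hjv : arr.getD j 0 < arr.getD i 0 := hcond i (le_refl i) hji'
        exact List.mem_cons_of_mem _ (hnotin_tw j hjv hjs)
    · exact List.pairwise_cons.mpr
        ⟨fun j hj => by have := (hS j (hmem' j hj)).1; omega, hP'⟩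
  refine ⟨hInv, ?_⟩
  have hQ : QR arr i (match stk.dropWhile p with | [] => arr.length | j :: _ => j) := by
    rcases hdw : stk.dropWhile p with _ | ⟨j0, t⟩
    · show QR arr i arr.length
      refine ⟨hi, le_refl _, ?_, Or.inl rfl⟩
      intro k hk1 hk2
      by_contra hkv
      push Not at hkv
      have hex : ∃ n, i < n ∧ n < arr.length ∧ arr.getD n 0 < arr.getD i 0 := ⟨k, hk1, hk2, hkv⟩
      have hKs := Nat.find_spec hex
      have hKmin : ∀ k', i < k' → k' < Nat.find hex → arr.getD i 0 ≤ arr.getD k' 0 := by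
        intro k' h1 h2
        have := Nat.find_min hex h2
        by_contra hc; push Not at hc
        exact this ⟨h1, by omega, hc⟩
      have hKmem : Nat.find hex ∈ stk := by
        refine hC _ (by omega) hKs.2.1 (fun k' h1 h2 => ?_)
        have := hKmin k' (by omega) h2
        have := hKs.2.2
        omega
      have := hnotin_tw _ hKs.2.2 hKmem
      rw [hdw] at this
      simp at this
    · show QR arr i j0
      have hj0s := hS j0 (hmem' j0 (by rw [hdw]; exact List.mem_cons_self ..))
      refine ⟨by omega, by omega, ?_, ?_⟩
      · intro k hk1 hk2
        by_contra hkv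
        push Not at hkv
        have hex : ∃ n, i < n ∧ n < j0 ∧ arr.getD n 0 < arr.getD i 0 := ⟨k, hk1, hk2, hkv⟩
        have hKs := Nat.find_spec hex
        have hKmin : ∀ k', i < k' → k' < Nat.find hex → arr.getD i 0 ≤ arr.getD k' 0 := by
          intro k' h1 h2
          have := Nat.find_min hex h2
          by_contra hc; push Not at hc
          exact this ⟨h1, by omega, hc⟩
        have hKmem : Nat.find hex ∈ stk := by
          refine hC _ (by omega) (by omega) (fun k' h1 h2 => ?_)
          have := hKmin k' (by omega) h2
          have := hKs.2.2
          omega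
        have hKd := hnotin_tw _ hKs.2.2 hKmem
        rw [hdw] at hKd
        rcases List.mem_cons.mp hKd with heq | hKt
        · have := hKs.2.1; omega
        · rw [hdw] at hP'
          have := (List.pairwise_cons.mp hP').1 _ hKt
          have := hKs.2.1
          omega
      · right
        exact hlt j0 (by rw [hdw]; exact List.mem_cons_self ..)
  exact QR_unique arr i _ _ hQ (QR_endSpec arr i hi)

lemma foldF_spec (arr : List Int) (m : Nat) (hm : m ≤ arr.length) :
    SInvF arr m ((List.range m).foldl (stepF arr) ([], [])).1 ∧
    ((List.range m).foldl (stepF arr) ([], [])).2 = (List.range m).map (startSpec arr) := by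
  induction m with
  | zero =>
    refine ⟨⟨?_, ?_, ?_⟩, rfl⟩ <;> simp [List.range_zero]
  | succ m ih =>
    obtain ⟨h1, h2⟩ := ih (by omega)
    rw [List.range_succ, List.foldl_append, List.foldl_cons, List.foldl_nil]
    obtain ⟨hinv, hval⟩ :=
      SInvF_step arr m ((List.range m).foldl (stepF arr) ([], [])).1 (by omega) h1
    refine ⟨hinv, ?_⟩
    show ((List.range m).foldl (stepF arr) ([], [])).2 ++ _ = _
    rw [List.map_append, ← h2, hval]
    simp

lemma foldB_spec (arr : List Int) (c : Nat) (hc : c ≤ arr.length) :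
    SInvB arr (arr.length - c)
      (((List.range' (arr.length - c) c).reverse).foldl (stepB arr) ([], [])).1 ∧
    ((((List.range' (arr.length - c) c).reverse).foldl (stepB arr) ([], [])).2).reverse
      = (List.range' (arr.length - c) c).map (endSpec arr) := by
  induction c with
  | zero =>
    refine ⟨⟨?_, ?_, ?_⟩, rfl⟩
    · intro j hj
      exact absurd hj (by simp)
    · intro j hj1 hj2 _
      exact absurd hj2 (by omega)
    · exact List.Pairwise.nil
  | succ c ih =>
    obtain ⟨h1, h2⟩ := ih (by omega)
    set stk := (((List.range' (arr.length - c) c).reverse).foldl (stepB arr) ([], []))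
      with hstk
    have hr : List.range' (arr.length - (c + 1)) (c + 1)
        = (arr.length - (c + 1)) :: List.range' (arr.length - c) c := by
      have heq : arr.length - (c + 1) + 1 = arr.length - c := by omega
      rw [List.range'_succ, heq]
    rw [hr, List.reverse_cons, List.foldl_append, List.foldl_cons, List.foldl_nil, ← hstk]
    have hieq : arr.length - c = (arr.length - (c + 1)) + 1 := by omega
    rw [hieq] at h1
    obtain ⟨hinv, hval⟩ :=
      SInvB_step arr (arr.length - (c + 1)) stk.1 (by omega) h1
    refine ⟨by exact hinv, ?_⟩
    show (stk.2 ++ _).reverse = _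
    rw [List.reverse_append, List.map_cons, ← h2, hval]
    simp

lemma goR_eq (arr : List Int) (p : Int) (i k : Nat) (s : Int) :
    goR arr p i k s = s + ((arr.drop (i + k)).takeWhile (fun x => decide (p ≤ x))).sum := by
  fun_induction goR arr p i k s with
  | case1 k s h hp ih =>
    rw [ih]
    have hd : arr.drop (i + k) = arr[i + k] :: arr.drop (i + k + 1) :=
      List.drop_eq_getElem_cons h
    have hik : i + (k + 1) = i + k + 1 := by omega
    have hg : arr.getD (i + k) 0 = arr[i + k] := List.getD_eq_getElem arr 0 h
    rw [hik, hd, List.takeWhile_cons_of_pos (by rw [← hg]; simpa using hp), List.sum_cons]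
    rw [hg]
    ring
  | case2 k s h hp =>
    have hd : arr.drop (i + k) = arr[i + k] :: arr.drop (i + k + 1) :=
      List.drop_eq_getElem_cons h
    have hg : arr.getD (i + k) 0 = arr[i + k] := List.getD_eq_getElem arr 0 h
    rw [hd, List.takeWhile_cons_of_neg (by rw [← hg]; simpa using hp)]
    simp
  | case3 k s h =>
    rw [List.drop_eq_nil_of_le (by omega)]
    simp

lemma take_succ_reverse (arr : List Int) (m : Nat) (hm : m < arr.length) :
    (arr.take (m + 1)).reverse = arr[m] :: (arr.take m).reverse := by
  rw [List.take_add_one, List.getElem?_eq_getElem hm]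
  simp

lemma goL_eq (arr : List Int) (p : Int) (i : Nat) (hi : i < arr.length) :
    ∀ k s, k ≤ i + 1 →
    goL arr p i k s = s + (((arr.take (i + 1 - k)).reverse).takeWhile (fun x => decide (p ≤ x))).sum := by
  intro k s hk
  fun_induction goL arr p i k s with
  | case1 k s h hp ih =>
    rw [ih (by omega)]
    have hik : i - k < arr.length := by omega
    have hg : arr.getD (i - k) 0 = arr[i - k] := List.getD_eq_getElem arr 0 hik
    have h1 : i + 1 - k = (i - k) + 1 := by omega
    have h2 : i + 1 - (k + 1) = i - k := by omega
    rw [h1, h2, take_succ_reverse arr (i - k) hik,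
      List.takeWhile_cons_of_pos (by rw [← hg]; simpa using hp), List.sum_cons, hg]
    ring
  | case2 k s h hp =>
    have hik : i - k < arr.length := by omega
    have hg : arr.getD (i - k) 0 = arr[i - k] := List.getD_eq_getElem arr 0 hik
    have h1 : i + 1 - k = (i - k) + 1 := by omega
    rw [h1, take_succ_reverse arr (i - k) hik,
      List.takeWhile_cons_of_neg (by rw [← hg]; simpa using hp)]
    simp
  | case3 k s h =>
    have h1 : i + 1 - k = 0 := by omega
    rw [h1]
    simp

lemma preList_getD (l : List Int) (s : Int) (j : Nat) (hj : j ≤ l.length) :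
    (preList s l).getD j 0 = s + (l.take j).sum := by
  induction l generalizing s j with
  | nil =>
    have : j = 0 := by simpa using hj
    subst this
    simp [preList]
  | cons x xs ih =>
    cases j with
    | zero => simp [preList]
    | succ j =>
      simp only [preList, List.getD_cons_succ, List.take_succ_cons, List.sum_cons]
      rw [ih (s + x) j (by simpa using hj)]
      ring

lemma perIndex (arr : List Int) (i : Nat) (hi : i < arr.length) :
    (preList 0 arr).getD (endSpec arr i) 0 - (preList 0 arr).getD (startSpec arr i) 0 =
      goL arr (arr.getD i 0) i 1 (goR arr (arr.getD i 0) i 1 (arr.getD i 0)) := by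
  have hL : lextLen arr i ≤ i := by
    calc lextLen arr i ≤ ((arr.take i).reverse).length := (List.takeWhile_prefix _).length_le
      _ = i := by simp [Nat.min_eq_left (le_of_lt hi)]
  have hR : rextLen arr i ≤ arr.length - (i + 1) := by
    calc rextLen arr i ≤ (arr.drop (i + 1)).length := (List.takeWhile_prefix _).length_le
      _ = arr.length - (i + 1) := by simp
  have hpre1 : (preList 0 arr).getD (endSpec arr i) 0 = (arr.take (i + 1 + rextLen arr i)).sum := by
    rw [preList_getD arr 0 _ (by unfold endSpec; omega)]
    unfold endSpec
    ring
  have hpre2 : (preList 0 arr).getD (startSpec arr i) 0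
      = (arr.take (i - lextLen arr i)).sum := by
    rw [preList_getD arr 0 _ (by unfold startSpec; omega)]
    unfold startSpec
    ring
  have e1 : (arr.take (i + 1 + rextLen arr i)).sum
      = (arr.take (i + 1)).sum
        + ((arr.drop (i + 1)).takeWhile (fun x => decide (arr.getD i 0 ≤ x))).sum := by
    rw [List.take_add, List.sum_append]
    congr 1
    exact congrArg List.sum ((List.prefix_iff_eq_take.mp (List.takeWhile_prefix _))).symm
  have e2 : (arr.take (i + 1)).sum = (arr.take i).sum + arr.getD i 0 := by
    rw [List.take_add_one, List.sum_append, List.getElem?_eq_getElem hi,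
      List.getD_eq_getElem arr 0 hi]
    simp
  have e3 : (arr.take i).sum = (arr.take (i - lextLen arr i)).sum
      + (((arr.take i).reverse).takeWhile (fun x => decide (arr.getD i 0 ≤ x))).sum := by
    have htL : ((arr.take i).reverse).takeWhile (fun x => decide (arr.getD i 0 ≤ x))
        = ((arr.take i).reverse).take (lextLen arr i) :=
      List.prefix_iff_eq_take.mp (List.takeWhile_prefix _)
    have hlen : (arr.take i).length = i := by simp [Nat.min_eq_left (le_of_lt hi)]
    have hsplit : arr.take i
        = arr.take (i - lextLen arr i) ++ (arr.drop (i - lextLen arr i)).take (lextLen arr i) := by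
      rw [← List.take_add]
      congr 1
      omega
    rw [htL, List.take_reverse, hlen, List.sum_reverse, List.drop_take]
    have hmm : i - (i - lextLen arr i) = lextLen arr i := by omega
    rw [hmm]
    conv_lhs => rw [hsplit]
    rw [List.sum_append]
  rw [hpre1, hpre2, goL_eq arr (arr.getD i 0) i hi 1 _ (by omega),
    goR_eq arr (arr.getD i 0) i 1 (arr.getD i 0)]
  simp only [Nat.add_sub_cancel]
  omega

-- ===== VERDICT (by name: the statement is the Claim_ definition above) =====
theorem maxRegion_spec : Claim_equal_maxRegion := by
  intro arr _
  unfold Spec_maxRegion maxRegion maxRegion_alt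
  obtain ⟨_, hstarts⟩ := foldF_spec arr arr.length (le_refl _)
  have hB := foldB_spec arr arr.length (le_refl _)
  rw [Nat.sub_self, ← List.range_eq_range'] at hB
  obtain ⟨_, hends⟩ := hB
  apply PySem.List.foldl_congr_mem
  intro acc i hi
  have hin : i < arr.length := List.mem_range.mp hi
  have hs : (((List.range arr.length).foldl (stepF arr) ([], [])).2).getD i 0
      = startSpec arr i := by
    rw [hstarts, List.getD_eq_getElem _ 0 (by simpa using hin), List.getElem_map,
      List.getElem_range]
  have he : (((((List.range arr.length).reverse).foldl (stepB arr) ([], [])).2).reverse).getD i 0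
      = endSpec arr i := by
    rw [hends, List.getD_eq_getElem _ 0 (by simpa using hin), List.getElem_map,
      List.getElem_range]
  rw [hs, he, perIndex arr i hin]
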